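-- pv_equiv track=rewrite | github.com/vishakjai/synthetix | utils/landscape_router.py | _archetypes_for_paths
-- ===== SOURCE A (Python) =====
-- PHP_TEMPLATE_SUFFIXES = (".blade.php", ".twig", ".tpl.php")
--
-- def _archetypes_for_paths(paths: list[str]) -> list[str]:
--     lower_paths = [p.lower() for p in paths]
--     found: list[str] = []
--     if any(p.endswith(".frm") for p in lower_paths) and any(p.endswith(".vbp") for p in lower_paths):
--         found.append("desktop_forms_vb6")
--     if any(p.endswith((".sln", ".csproj")) for p in lower_paths):
--         found.append("api_service")
--     if any(p.endswith((".rpt", ".dsr")) for p in lower_paths):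
--         found.append("reporting_pack")
--     if any(p.endswith((".sql",)) for p in lower_paths):
--         found.append("database_scripts")
--     if any(p.endswith((".ps1", ".bat", ".cmd", ".sh")) for p in lower_paths):
--         found.append("batch_jobs")
--     if any(p.endswith((".php", ".phtml")) or p.endswith(PHP_TEMPLATE_SUFFIXES) for p in lower_paths):
--         if any(marker in p for p in lower_paths for marker in ("/controller/", "/controllers/", "/view/", "/views/", "/templates/", "/includes/")):
--             found.append("php_web_app")
--         else:
--             found.append("php_application")
--     return found
-- ===== SOURCE B (Python) =====
-- PHP_TEMPLATE_SUFFIXES = (".blade.php", ".twig", ".tpl.php")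
--
-- _MARKERS = ("/controller/", "/controllers/", "/view/", "/views/", "/templates/", "/includes/")
--
-- def _archetypes_for_paths(paths):
--     frm = vbp = net = rpt = sql = bat = php = mark = False
--     for p in paths:
--         q = p.lower()
--         frm = frm or q.endswith(".frm")
--         vbp = vbp or q.endswith(".vbp")
--         net = net or q.endswith((".sln", ".csproj"))
--         rpt = rpt or q.endswith((".rpt", ".dsr"))
--         sql = sql or q.endswith(".sql")
--         bat = bat or q.endswith((".ps1", ".bat", ".cmd", ".sh"))
--         php = php or q.endswith((".php", ".phtml")) or q.endswith(PHP_TEMPLATE_SUFFIXES)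
--         mark = mark or any(m in q for m in _MARKERS)
--     found = []
--     if frm and vbp:
--         found.append("desktop_forms_vb6")
--     if net:
--         found.append("api_service")
--     if rpt:
--         found.append("reporting_pack")
--     if sql:
--         found.append("database_scripts")
--     if bat:
--         found.append("batch_jobs")
--     if php:
--         found.append("php_web_app" if mark else "php_application")
--     return found
-- ===== Notes on version B (the rewrite author's own statement) =====
-- stated objective: alternative
-- what changed: Replaces A's eight separate any()-scans over a prebuilt lowercased list with a single pass that lowercases each path once and accumulates one boolean flag per category, then emits the tags in the fixed order from the flags.
import Mathlib
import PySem

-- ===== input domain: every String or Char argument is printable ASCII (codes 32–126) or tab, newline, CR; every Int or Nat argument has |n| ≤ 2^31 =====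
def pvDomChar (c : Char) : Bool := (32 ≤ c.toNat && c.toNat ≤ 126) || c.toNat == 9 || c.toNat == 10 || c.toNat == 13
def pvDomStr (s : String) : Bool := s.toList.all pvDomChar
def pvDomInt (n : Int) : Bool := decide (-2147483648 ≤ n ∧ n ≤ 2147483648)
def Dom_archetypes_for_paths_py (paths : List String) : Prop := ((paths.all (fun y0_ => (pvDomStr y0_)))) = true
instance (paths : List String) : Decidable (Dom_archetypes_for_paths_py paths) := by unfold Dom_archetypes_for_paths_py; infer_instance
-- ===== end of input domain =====

-- ===== PORT A =====
-- B replaces A's eight repeated any()-scans by one flag-accumulating pass (alternative decomposition).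
def archetypes_for_paths_py (paths : List String) : List String :=
  let lower_paths := paths.map (fun p => PySem.Str.lower p)
  let found : List String := []
  let found := if lower_paths.any (fun p => PySem.Str.endswith p ".frm") &&
                  lower_paths.any (fun p => PySem.Str.endswith p ".vbp")
               then found ++ ["desktop_forms_vb6"] else found
  let found := if lower_paths.any (fun p => PySem.Str.endswith p ".sln" || PySem.Str.endswith p ".csproj")
               then found ++ ["api_service"] else found
  let found := if lower_paths.any (fun p => PySem.Str.endswith p ".rpt" || PySem.Str.endswith p ".dsr")
               then found ++ ["reporting_pack"] else found
  let found := if lower_paths.any (fun p => PySem.Str.endswith p ".sql")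
               then found ++ ["database_scripts"] else found
  let found := if lower_paths.any (fun p => PySem.Str.endswith p ".ps1" || PySem.Str.endswith p ".bat" ||
                                            PySem.Str.endswith p ".cmd" || PySem.Str.endswith p ".sh")
               then found ++ ["batch_jobs"] else found
  let found := if lower_paths.any (fun p => (PySem.Str.endswith p ".php" || PySem.Str.endswith p ".phtml") ||
                                            (PySem.Str.endswith p ".blade.php" || PySem.Str.endswith p ".twig" ||
                                             PySem.Str.endswith p ".tpl.php"))
               then (if lower_paths.any (fun p =>
                        ["/controller/", "/controllers/", "/view/", "/views/", "/templates/", "/includes/"].any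
                          (fun marker => PySem.Str.isIn marker p))
                     then found ++ ["php_web_app"] else found ++ ["php_application"])
               else found
  found

-- ===== PORT B =====
-- one step of B's single pass: update the eight flags from one path
def pvStep (f : Bool × Bool × Bool × Bool × Bool × Bool × Bool × Bool) (p : String) :
    Bool × Bool × Bool × Bool × Bool × Bool × Bool × Bool :=
  let q := PySem.Str.lower p
  (f.1 || PySem.Str.endswith q ".frm",
   f.2.1 || PySem.Str.endswith q ".vbp",
   f.2.2.1 || (PySem.Str.endswith q ".sln" || PySem.Str.endswith q ".csproj"),
   f.2.2.2.1 || (PySem.Str.endswith q ".rpt" || PySem.Str.endswith q ".dsr"),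
   f.2.2.2.2.1 || PySem.Str.endswith q ".sql",
   f.2.2.2.2.2.1 || (PySem.Str.endswith q ".ps1" || PySem.Str.endswith q ".bat" ||
                     PySem.Str.endswith q ".cmd" || PySem.Str.endswith q ".sh"),
   f.2.2.2.2.2.2.1 || ((PySem.Str.endswith q ".php" || PySem.Str.endswith q ".phtml") ||
                       (PySem.Str.endswith q ".blade.php" || PySem.Str.endswith q ".twig" ||
                        PySem.Str.endswith q ".tpl.php")),
   f.2.2.2.2.2.2.2 || ["/controller/", "/controllers/", "/view/", "/views/", "/templates/", "/includes/"].any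
                        (fun m => PySem.Str.isIn m q))

def archetypes_for_paths_py_alt (paths : List String) : List String :=
  let f := paths.foldl pvStep (false, false, false, false, false, false, false, false)
  (if f.1 && f.2.1 then ["desktop_forms_vb6"] else []) ++
  (if f.2.2.1 then ["api_service"] else []) ++
  (if f.2.2.2.1 then ["reporting_pack"] else []) ++
  (if f.2.2.2.2.1 then ["database_scripts"] else []) ++
  (if f.2.2.2.2.2.1 then ["batch_jobs"] else []) ++
  (if f.2.2.2.2.2.2.1 then (if f.2.2.2.2.2.2.2 then ["php_web_app"] else ["php_application"]) else [])

-- ===== PRECONDITION & SPEC =====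
def Spec_archetypes_for_paths_py (paths : List String) (out : List String) : Prop := out = archetypes_for_paths_py_alt paths
instance (paths : List String) (out : List String) : Decidable (Spec_archetypes_for_paths_py paths out) := by unfold Spec_archetypes_for_paths_py; infer_instance

-- ===== CLAIM (what is proved, stated in full; the proofs are below) =====
def Claim_equal_archetypes_for_paths_py : Prop := ∀ (paths : List String), Dom_archetypes_for_paths_py paths → Spec_archetypes_for_paths_py paths (archetypes_for_paths_py paths)

-- ===== LEMMAS AND PROOFS =====
-- the single pass computes, in each component, 'init || any over the lowercased paths'
theorem pvFold_flags (paths : List String) (a b c d e f g h : Bool) :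
    paths.foldl pvStep (a, b, c, d, e, f, g, h) =
      (a || (paths.map (fun p => PySem.Str.lower p)).any (fun p => PySem.Str.endswith p ".frm"),
       b || (paths.map (fun p => PySem.Str.lower p)).any (fun p => PySem.Str.endswith p ".vbp"),
       c || (paths.map (fun p => PySem.Str.lower p)).any
              (fun p => PySem.Str.endswith p ".sln" || PySem.Str.endswith p ".csproj"),
       d || (paths.map (fun p => PySem.Str.lower p)).any
              (fun p => PySem.Str.endswith p ".rpt" || PySem.Str.endswith p ".dsr"),
       e || (paths.map (fun p => PySem.Str.lower p)).any (fun p => PySem.Str.endswith p ".sql"),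
       f || (paths.map (fun p => PySem.Str.lower p)).any
              (fun p => PySem.Str.endswith p ".ps1" || PySem.Str.endswith p ".bat" ||
                        PySem.Str.endswith p ".cmd" || PySem.Str.endswith p ".sh"),
       g || (paths.map (fun p => PySem.Str.lower p)).any
              (fun p => (PySem.Str.endswith p ".php" || PySem.Str.endswith p ".phtml") ||
                        (PySem.Str.endswith p ".blade.php" || PySem.Str.endswith p ".twig" ||
                         PySem.Str.endswith p ".tpl.php")),
       h || (paths.map (fun p => PySem.Str.lower p)).any
              (fun p => ["/controller/", "/controllers/", "/view/", "/views/", "/templates/", "/includes/"].any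
                          (fun m => PySem.Str.isIn m p))) := by
  induction paths generalizing a b c d e f g h with
  | nil => simp
  | cons p rest ih =>
    simp only [List.foldl_cons, List.map_cons, List.any_cons, pvStep, ih, Bool.or_assoc]

-- ===== VERDICT (by name: the statement is the Claim_ definition above) =====
theorem archetypes_for_paths_py_spec : Claim_equal_archetypes_for_paths_py := by
  intro paths _
  unfold Spec_archetypes_for_paths_py archetypes_for_paths_py archetypes_for_paths_py_alt
  rw [pvFold_flags]
  simp only [Bool.false_or]
  generalize (paths.map (fun p => PySem.Str.lower p)).any (fun p => PySem.Str.endswith p ".frm") = b1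
  generalize (paths.map (fun p => PySem.Str.lower p)).any (fun p => PySem.Str.endswith p ".vbp") = b2
  generalize (paths.map (fun p => PySem.Str.lower p)).any
      (fun p => PySem.Str.endswith p ".sln" || PySem.Str.endswith p ".csproj") = b3
  generalize (paths.map (fun p => PySem.Str.lower p)).any
      (fun p => PySem.Str.endswith p ".rpt" || PySem.Str.endswith p ".dsr") = b4
  generalize (paths.map (fun p => PySem.Str.lower p)).any (fun p => PySem.Str.endswith p ".sql") = b5
  generalize (paths.map (fun p => PySem.Str.lower p)).any
      (fun p => PySem.Str.endswith p ".ps1" || PySem.Str.endswith p ".bat" ||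
                PySem.Str.endswith p ".cmd" || PySem.Str.endswith p ".sh") = b6
  generalize (paths.map (fun p => PySem.Str.lower p)).any
      (fun p => (PySem.Str.endswith p ".php" || PySem.Str.endswith p ".phtml") ||
                (PySem.Str.endswith p ".blade.php" || PySem.Str.endswith p ".twig" ||
                 PySem.Str.endswith p ".tpl.php")) = b7
  generalize (paths.map (fun p => PySem.Str.lower p)).any
      (fun p => ["/controller/", "/controllers/", "/view/", "/views/", "/templates/", "/includes/"].any
                  (fun m => PySem.Str.isIn m p)) = b8
  cases b1 <;> cases b2 <;> cases b3 <;> cases b4 <;> cases b5 <;> cases b6 <;> cases b7 <;> cases b8 <;> rfl
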